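-- pv_equiv track=rewrite | github.com/MrBrantCode/unitest_baseline | mut_generate/mist_train_taco/taco_537/solution.py | determine_winner
-- ===== SOURCE A (Python) =====
-- def determine_winner(N):
--     oddsum = 1
--     evensum = 0
--     totsteps = 0
--
--     num = N
--     while num > 1:
--         if num % 2 == 0:
--             evensum += num
--             num //= 2
--         else:
--             oddsum += num
--             num = (3 * num) + 1
--         totsteps += 1
--
--     evenrem = evensum % totsteps
--     oddrem = oddsum % totsteps
--
--     if oddrem > evenrem:
--         return "Odd Rules"
--     elif oddrem < evenrem:
--         return "Even Rules"
--     else: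
--         return "Tie"
-- ===== SOURCE B (Python) =====
-- def determine_winner(N):
--     # Build the list of Collatz values the process visits before reaching 1,
--     # then total the odd and even entries in separate filtered passes.
--     steps = []
--     num = N
--     while num > 1:
--         steps.append(num)
--         num = num // 2 if num % 2 == 0 else 3 * num + 1
--     oddsum = 1 + sum(x for x in steps if x % 2 != 0)   # terminal 1 is odd
--     evensum = sum(x for x in steps if x % 2 == 0)
--     totsteps = len(steps)
--     evenrem = evensum % totsteps
--     oddrem = oddsum % totsteps
--     if oddrem > evenrem:
--         return "Odd Rules"
--     elif oddrem < evenrem: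
--         return "Even Rules"
--     else:
--         return "Tie"
-- ===== Notes on version B (the rewrite author's own statement) =====
-- stated objective: alternative
-- what changed: A accumulates oddsum/evensum/totsteps inside one while loop; B first materialises the list of Collatz values visited before reaching 1, then obtains the two sums by separate filtered passes over that list and the step count as its length.
-- outside the precondition, e.g. on determine_winner(1): A raises ZeroDivisionError, B raises ZeroDivisionError
import Mathlib
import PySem

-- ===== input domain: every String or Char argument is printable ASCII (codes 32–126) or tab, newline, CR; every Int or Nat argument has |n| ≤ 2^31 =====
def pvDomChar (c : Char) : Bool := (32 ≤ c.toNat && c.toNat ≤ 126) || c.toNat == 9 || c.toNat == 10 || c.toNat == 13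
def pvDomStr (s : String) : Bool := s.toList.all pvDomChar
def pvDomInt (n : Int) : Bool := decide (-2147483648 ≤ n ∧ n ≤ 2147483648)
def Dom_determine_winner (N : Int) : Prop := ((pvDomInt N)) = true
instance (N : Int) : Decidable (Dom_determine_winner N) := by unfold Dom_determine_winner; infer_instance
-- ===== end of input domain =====

-- B builds the Collatz step list first and totals odd/even entries in two filtered
-- passes (different decomposition, same cost); return values agree with A everywhere A returns.
-- Both while-loops are ported with the same fixed fuel bound (a port artefact; the
-- proofs below hold for every fuel value, and the equivalence never depends on it).
def pvFuel : Nat := 100000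

-- ===== PORT A =====
-- the while loop of A: state (num, oddsum, evensum, totsteps)
def pvALoop : Nat → Int → Int → Int → Int → Int × Int × Int
  | 0, _, oddsum, evensum, totsteps => (oddsum, evensum, totsteps)
  | f+1, num, oddsum, evensum, totsteps =>
    if num > 1 then
      if PySem.Int.mod num 2 == 0 then
        pvALoop f (PySem.Int.floordiv num 2) oddsum (evensum + num) (totsteps + 1)
      else
        pvALoop f (3 * num + 1) (oddsum + num) evensum (totsteps + 1)
    else (oddsum, evensum, totsteps)

def determine_winner (N : Int) : String :=
  let r := pvALoop pvFuel N 1 0 0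
  let oddsum := r.1
  let evensum := r.2.1
  let totsteps := r.2.2
  let evenrem := PySem.Int.mod evensum totsteps   -- Python raises here iff totsteps = 0 (N ≤ 1): excluded by Pre_
  let oddrem := PySem.Int.mod oddsum totsteps
  if oddrem > evenrem then "Odd Rules"
  else if oddrem < evenrem then "Even Rules"
  else "Tie"

-- ===== PORT B =====
-- B's list-building loop: the values visited while num > 1
def pvBSteps : Nat → Int → List Int
  | 0, _ => []
  | f+1, num =>
    if num > 1 then
      num :: pvBSteps f (if PySem.Int.mod num 2 == 0 then PySem.Int.floordiv num 2 else 3 * num + 1)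
    else []

def determine_winner_alt (N : Int) : String :=
  let steps := pvBSteps pvFuel N
  let oddsum := 1 + (steps.filter (fun x => PySem.Int.mod x 2 != 0)).sum
  let evensum := (steps.filter (fun x => PySem.Int.mod x 2 == 0)).sum
  let totsteps := PySem.List.len steps
  let evenrem := PySem.Int.mod evensum totsteps   -- Python raises here iff totsteps = 0 (N ≤ 1): excluded by Pre_
  let oddrem := PySem.Int.mod oddsum totsteps
  if oddrem > evenrem then "Odd Rules"
  else if oddrem < evenrem then "Even Rules"
  else "Tie"

-- ===== PRECONDITION & SPEC =====
-- Pre_ excludes exactly N ≤ 1, where the loop runs zero times and both Pythons raise ZeroDivisionError (% 0).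
def Pre_determine_winner (N : Int) : Prop := 2 ≤ N
instance (N : Int) : Decidable (Pre_determine_winner N) := by unfold Pre_determine_winner; infer_instance
def pvWitness_determine_winner : Int := (2)

def Spec_determine_winner (N : Int) (out : String) : Prop := out = determine_winner_alt N
instance (N : Int) (out : String) : Decidable (Spec_determine_winner N out) := by unfold Spec_determine_winner; infer_instance

-- ===== CLAIM (what is proved, stated in full; the proofs are below) =====
def Claim_equal_determine_winner : Prop := ∀ (N : Int), Dom_determine_winner N → Pre_determine_winner N → Spec_determine_winner N (determine_winner N)

-- ===== LEMMAS AND PROOFS =====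

-- A's accumulator loop computes the filtered sums / length of B's step list, offset by the start state.
theorem pvLoop_eq_steps (f : Nat) : ∀ (num o e t : Int),
    pvALoop f num o e t =
      (o + ((pvBSteps f num).filter (fun x => PySem.Int.mod x 2 != 0)).sum,
       e + ((pvBSteps f num).filter (fun x => PySem.Int.mod x 2 == 0)).sum,
       t + ((pvBSteps f num).length : Int)) := by
  induction f with
  | zero => intro num o e t; simp [pvALoop, pvBSteps]
  | succ f ih =>
    intro num o e t
    by_cases h : num > 1
    · by_cases hd : (2:Int) ∣ num
      · have hm : num % 2 = 0 := by omega
        simp [pvALoop, pvBSteps, h, hm, ih, Prod.mk.injEq]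
        omega
      · have hm : num % 2 = 1 := by omega
        simp [pvALoop, pvBSteps, h, hm, ih, Prod.mk.injEq]
        omega
    · simp [pvALoop, pvBSteps, h]

-- ===== VERDICT (by name: the statement is the Claim_ definition above) =====
theorem determine_winner_spec : Claim_equal_determine_winner := by
  intro N _ _
  unfold Spec_determine_winner determine_winner determine_winner_alt
  simp [pvLoop_eq_steps, PySem.List.len_eq, add_comm]
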